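-- pv_equiv track=rewrite | github.com/goyalayus/tenyson | examples/wordle/functional.py | _validate_eval_exact_turns
-- ===== SOURCE A (Python) =====
-- from typing import Any, Dict, List, Optional, Sequence, Tuple
--
-- def _validate_eval_exact_turns(turns: Any) -> List[int]:
--     if not isinstance(turns, list) or not turns:
--         raise ValueError(
--             "task.eval_exact_turns must be a non-empty list of turns (1..6)."
--         )
--     parsed: List[int] = []
--     for turn in turns:
--         if not isinstance(turn, int):
--             raise ValueError(
--                 f"task.eval_exact_turns must contain integers only, got {type(turn).__name__}."
--             )
--         if turn < 1 or turn > 6: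
--             raise ValueError(
--                 f"task.eval_exact_turns values must be within 1..6, got {turn}."
--             )
--         parsed.append(turn)
--     return sorted(list(set(parsed)))
-- ===== SOURCE B (Python) =====
-- def _validate_eval_exact_turns(turns):
--     if not isinstance(turns, list) or not turns:
--         raise ValueError(
--             "task.eval_exact_turns must be a non-empty list of turns (1..6)."
--         )
--     for turn in turns:
--         if not isinstance(turn, int):
--             raise ValueError(
--                 f"task.eval_exact_turns must contain integers only, got {type(turn).__name__}."
--             )
--         if turn < 1 or turn > 6:
--             raise ValueError(
--                 f"task.eval_exact_turns values must be within 1..6, got {turn}."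
--             )
--     return [v for v in range(1, 7) if v in turns]
-- ===== Notes on version B (the rewrite author's own statement) =====
-- stated objective: simpler
-- what changed: B never builds a parsed list, a set or sorts: it validates, then constructs the output value-driven by scanning the six candidate values 1..6 in order and keeping those present in the input via a membership test, which is deduplicated and ascending by construction.
import Mathlib
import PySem

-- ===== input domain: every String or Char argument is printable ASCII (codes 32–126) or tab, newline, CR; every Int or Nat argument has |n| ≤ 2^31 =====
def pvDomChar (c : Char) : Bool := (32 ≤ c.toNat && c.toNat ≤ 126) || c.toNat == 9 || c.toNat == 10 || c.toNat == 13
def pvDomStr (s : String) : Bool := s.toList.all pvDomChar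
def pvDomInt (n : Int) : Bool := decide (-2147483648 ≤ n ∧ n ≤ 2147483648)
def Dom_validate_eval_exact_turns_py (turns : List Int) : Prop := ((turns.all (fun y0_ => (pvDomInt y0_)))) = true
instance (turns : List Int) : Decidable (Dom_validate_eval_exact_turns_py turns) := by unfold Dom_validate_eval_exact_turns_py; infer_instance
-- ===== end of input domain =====

-- B validates and then builds the output value-driven: scan candidates 1..6 and keep
-- those present in the input, instead of A's collect + sorted(list(set(...))); equal on
-- every input A accepts (Pre_ excludes exactly the inputs where A raises ValueError).


-- ===== PORT A =====
-- the validation loop appends each turn to `parsed`; the raising branches are excluded by Pre_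
def validate_eval_exact_turns_py (turns : List Int) : List Int :=
  let parsed : List Int := turns.foldl (fun acc turn => acc ++ [turn]) []
  PySem.List.sorted (PySem.Set.ofList parsed) (fun x => x) false

-- ===== PORT B =====
-- after validation, [v for v in range(1, 7) if v in turns]
def validate_eval_exact_turns_py_alt (turns : List Int) : List Int :=
  (PySem.List.pyRange 1 7 1).filter (fun v => decide (v ∈ turns))

-- ===== PRECONDITION & SPEC =====
-- A raises ValueError on the empty list and on any turn outside 1..6; exactly those are excluded.
def Pre_validate_eval_exact_turns_py (turns : List Int) : Prop :=
  turns ≠ [] ∧ ∀ t ∈ turns, 1 ≤ t ∧ t ≤ 6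
instance (turns : List Int) : Decidable (Pre_validate_eval_exact_turns_py turns) := by unfold Pre_validate_eval_exact_turns_py; infer_instance
def pvWitness_validate_eval_exact_turns_py : List Int := [3, 1, 3, 6]
def Spec_validate_eval_exact_turns_py (turns : List Int) (out : List Int) : Prop := out = validate_eval_exact_turns_py_alt turns
instance (turns : List Int) (out : List Int) : Decidable (Spec_validate_eval_exact_turns_py turns out) := by unfold Spec_validate_eval_exact_turns_py; infer_instance

-- ===== CLAIM (what is proved, stated in full; the proofs are below) =====
def Claim_equal_validate_eval_exact_turns_py : Prop := ∀ (turns : List Int), Dom_validate_eval_exact_turns_py turns → Pre_validate_eval_exact_turns_py turns → Spec_validate_eval_exact_turns_py turns (validate_eval_exact_turns_py turns)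

-- ===== LEMMAS AND PROOFS =====

-- ===== VERDICT (by name: the statement is the Claim_ definition above) =====
theorem validate_eval_exact_turns_py_spec : Claim_equal_validate_eval_exact_turns_py := by
  intro turns _ hpre
  obtain ⟨-, hall⟩ := hpre
  unfold Spec_validate_eval_exact_turns_py validate_eval_exact_turns_py validate_eval_exact_turns_py_alt
  simp only [PySem.List.foldl_append_singleton, List.nil_append]
  set rhs := (PySem.List.pyRange 1 7 1).filter (fun v => decide (v ∈ turns)) with hrhs
  have hmem : ∀ x : Int, x ∈ rhs ↔ x ∈ PySem.Set.ofList turns := by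
    intro x
    rw [hrhs, List.mem_filter, PySem.List.mem_pyRange_one, PySem.Set.mem_ofList]
    constructor
    · rintro ⟨-, hb⟩; simpa using hb
    · intro hx
      have hb := hall x hx
      exact ⟨⟨hb.1, by omega⟩, by simpa using hx⟩
  have hnodup : rhs.Nodup := (PySem.List.nodup_pyRange_one 1 7).filter _
  have hperm : rhs.Perm (PySem.Set.ofList turns) := by
    rw [List.perm_ext_iff_of_nodup hnodup (PySem.Set.nodup_ofList turns)]
    exact hmem
  have hpw : rhs.Pairwise (fun a b : Int => a < b) :=
    (PySem.List.pairwise_lt_pyRange_one 1 7).filter _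
  exact PySem.List.sorted_eq_of_perm_of_pairwise_lt (PySem.Set.ofList turns) rhs (fun x => x) hperm hpw
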